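-- pv_equiv track=rewrite | github.com/Tadwork/aoc-2023 | 3/day3.py | get_prod_of_adjacent_part_numbers_to_gear
-- ===== SOURCE A (Python) =====
-- def get_full_part_number_from_coord(matrix,row,col):
--     begin = col
--     while begin >=0 and matrix[row][begin].isnumeric():
--         begin-=1
--     end=col
--     while end < len(matrix[row]) and matrix[row][end].isnumeric():
--         end+=1
--     return int(''.join(matrix[row][begin+1:end])),end
--
-- def is_part_num(matrix, row, col):
--     if row<0 or col<0 or row>=len(matrix) or col>=len(matrix[row]):
--         return False
--     else:
--         return matrix[row][col].isnumeric()
--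
-- def get_prod_of_adjacent_part_numbers_to_gear(matrix, row, col):
--     part_numbers = []
--     c=col-1
--     while c < col+2:
--         if is_part_num(matrix,row+1,c):
--             num, end = get_full_part_number_from_coord(matrix,row+1,c)
--             part_numbers.append(num)
--             c=end
--         else:
--             c+=1
--     c=col-1
--     while c < col+2:
--         if is_part_num(matrix,row-1,c):
--             num, end = get_full_part_number_from_coord(matrix,row-1,c)
--             part_numbers.append(num)
--             c=end
--         else:
--             c+=1
--     if is_part_num(matrix,row,col-1):
--         part_numbers.append(get_full_part_number_from_coord(matrix,row,col-1)[0])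
--     if is_part_num(matrix,row,col+1):
--         part_numbers.append(get_full_part_number_from_coord(matrix,row,col+1)[0])
--     if len(part_numbers) == 2:
--         return part_numbers[0] * part_numbers[1]
--     return 0
-- ===== SOURCE B (Python) =====
-- def get_full_part_number_from_coord(matrix,row,col):
--     begin = col
--     while begin >=0 and matrix[row][begin].isnumeric():
--         begin-=1
--     end=col
--     while end < len(matrix[row]) and matrix[row][end].isnumeric():
--         end+=1
--     return int(''.join(matrix[row][begin+1:end])),end
--
-- def is_part_num(matrix, row, col):
--     if row<0 or col<0 or row>=len(matrix) or col>=len(matrix[row]):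
--         return False
--     else:
--         return matrix[row][col].isnumeric()
--
-- def get_prod_of_adjacent_part_numbers_to_gear(matrix, row, col):
--     nums = []
--     for r in (row + 1, row - 1):
--         for c in (col - 1, col, col + 1):
--             # uniform window scan: count each number once, at the leftmost of its
--             # cells that lies inside the 3-cell window
--             if is_part_num(matrix, r, c) and (c == col - 1 or not is_part_num(matrix, r, c - 1)):
--                 nums.append(get_full_part_number_from_coord(matrix, r, c)[0])
--     for c in (col - 1, col + 1):
--         if is_part_num(matrix, row, c):
--             nums.append(get_full_part_number_from_coord(matrix, row, c)[0])
--     return nums[0] * nums[1] if len(nums) == 2 else 0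
-- ===== Notes on version B (the rewrite author's own statement) =====
-- stated objective: simpler
-- what changed: A's two stateful while-loops that jump the scan index to a found number's end are replaced by a uniform for-scan of the six window cells above/below the gear that counts a number only at the leftmost of its cells inside the window; the middle-row left/right checks become a small loop.
import Mathlib
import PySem

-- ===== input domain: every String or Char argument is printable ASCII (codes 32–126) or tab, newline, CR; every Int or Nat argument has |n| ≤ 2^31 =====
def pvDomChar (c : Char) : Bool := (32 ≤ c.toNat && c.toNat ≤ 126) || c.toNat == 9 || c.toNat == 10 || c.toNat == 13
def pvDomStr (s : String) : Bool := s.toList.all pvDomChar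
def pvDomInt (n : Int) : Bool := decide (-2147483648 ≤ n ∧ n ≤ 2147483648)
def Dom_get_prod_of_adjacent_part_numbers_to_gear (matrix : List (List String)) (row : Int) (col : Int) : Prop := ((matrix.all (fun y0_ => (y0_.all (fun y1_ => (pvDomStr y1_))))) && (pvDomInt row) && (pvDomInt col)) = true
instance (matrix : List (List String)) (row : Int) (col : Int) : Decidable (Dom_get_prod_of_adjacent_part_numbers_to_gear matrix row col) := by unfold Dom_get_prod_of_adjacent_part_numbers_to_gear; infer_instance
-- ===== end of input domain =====

-- B replaces A's two jump-advance while-loops over the rows above/below by a uniform scan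
-- of the six window cells with a run-start test; same helpers, same value (objective: simpler).

-- ===== SHARED HELPERS (the Python module's helpers, used verbatim by A and B) =====

-- matrix[row][c].isnumeric() with the index-in-range guard folded in (false when c is out of
-- range; every use in the Python sits under such a range guard, so this is exact).
-- str.isnumeric() coincides with str.isdigit() on the printable-ASCII domain Dom_.
def pvNumAt (rw : List String) (c : Int) : Bool :=
  match PySem.List.pyGet? rw c with
  | some s => PySem.Str.strIsdigit s
  | none => false

-- while begin >= 0 and matrix[row][begin].isnumeric(): begin -= 1
def pvBeginAux (rw : List String) (b : Int) : Int :=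
  if h : 0 ≤ b ∧ pvNumAt rw b = true then pvBeginAux rw (b - 1) else b
termination_by (b + 1).toNat
decreasing_by omega

-- while end < len(matrix[row]) and matrix[row][end].isnumeric(): end += 1
def pvEndAux (rw : List String) (e : Int) : Int :=
  if h : e < (rw.length : Int) ∧ pvNumAt rw e = true then pvEndAux rw (e + 1) else e
termination_by ((rw.length : Int) - e).toNat
decreasing_by omega

-- get_full_part_number_from_coord; the .getD fallbacks are unreachable: every call in the
-- module is guarded by is_part_num, under which row is in range and the joined slice is a
-- nonempty digit string.
def get_full_part_number_from_coord (matrix : List (List String)) (row col : Int) : Int × Int :=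
  let rw := (PySem.List.pyGet? matrix row).getD []
  let b := pvBeginAux rw col
  let e := pvEndAux rw col
  ((PySem.Int.ofStr? (PySem.Str.join "" (PySem.List.slice rw (some (b + 1)) (some e)))).getD 0, e)

def is_part_num (matrix : List (List String)) (row col : Int) : Bool :=
  if row < 0 || col < 0 then false
  else
    match PySem.List.pyGet? matrix row with
    | none => false               -- row >= len(matrix)
    | some rw => pvNumAt rw col   -- col >= len(matrix[row]) gives false, else isnumeric

-- termination of A's jump loop: a numeric cell lies strictly left of its run's end
lemma pvNumAt_lt (rw : List String) (c : Int) (h : pvNumAt rw c = true) (_hc : 0 ≤ c) :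
    c < (rw.length : Int) := by
  unfold pvNumAt at h
  cases hcell : PySem.List.pyGet? rw c with
  | none => rw [hcell] at h; simp at h
  | some s =>
    have hin : PySem.Raise.InRange rw.length c := by
      by_contra hno
      rw [((PySem.List.pyGet?_eq_none_iff rw c).mpr hno)] at hcell
      cases hcell
    simp [PySem.Raise.InRange] at hin
    omega

lemma pvEndAux_ge (rw : List String) (e : Int) : e ≤ pvEndAux rw e := by
  fun_induction pvEndAux rw e with
  | case1 e h ih => omega
  | case2 e h => omega

lemma get_full_snd_gt (matrix : List (List String)) (row c : Int)
    (h : is_part_num matrix row c = true) :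
    c < (get_full_part_number_from_coord matrix row c).2 := by
  unfold is_part_num at h
  split at h
  · simp at h
  next hneg =>
    cases hg : PySem.List.pyGet? matrix row with
    | none => rw [hg] at h; simp at h
    | some rw =>
      rw [hg] at h
      have h' : pvNumAt rw c = true := h
      have hc : 0 ≤ c := by simp at hneg; omega
      have hlen : c < (rw.length : Int) := pvNumAt_lt rw c h' hc
      unfold get_full_part_number_from_coord
      rw [hg]
      show c < pvEndAux rw c
      rw [pvEndAux, dif_pos ⟨hlen, h'⟩]
      have := pvEndAux_ge rw (c + 1)
      omega

-- ===== PORT A =====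

-- the c-advancing while loop (after a hit, c jumps to the number's end)
def pvLoopA (matrix : List (List String)) (row col : Int) (c : Int) (acc : List Int) : List Int :=
  if hc : c < col + 2 then
    if hp : is_part_num matrix row c = true then
      pvLoopA matrix row col (get_full_part_number_from_coord matrix row c).2
        (acc ++ [(get_full_part_number_from_coord matrix row c).1])
    else pvLoopA matrix row col (c + 1) acc
  else acc
termination_by (col + 2 - c).toNat
decreasing_by
  · have := get_full_snd_gt matrix row c hp
    omega
  · omega

def get_prod_of_adjacent_part_numbers_to_gear (matrix : List (List String)) (row : Int) (col : Int) : Int :=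
  let l1 := pvLoopA matrix (row + 1) col (col - 1) []
  let l2 := pvLoopA matrix (row - 1) col (col - 1) l1
  let l3 := if is_part_num matrix row (col - 1) then
      l2 ++ [(get_full_part_number_from_coord matrix row (col - 1)).1] else l2
  let l4 := if is_part_num matrix row (col + 1) then
      l3 ++ [(get_full_part_number_from_coord matrix row (col + 1)).1] else l3
  if l4.length == 2 then PySem.List.pyGetD l4 0 0 * PySem.List.pyGetD l4 1 0 else 0

-- ===== PORT B =====

def get_prod_of_adjacent_part_numbers_to_gear_alt (matrix : List (List String)) (row : Int) (col : Int) : Int :=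
  let nums := [row + 1, row - 1].foldl (fun acc r =>
    [col - 1, col, col + 1].foldl (fun acc c =>
      if is_part_num matrix r c && (c == col - 1 || !is_part_num matrix r (c - 1)) then
        acc ++ [(get_full_part_number_from_coord matrix r c).1]
      else acc) acc) []
  let nums2 := [col - 1, col + 1].foldl (fun acc c =>
    if is_part_num matrix row c then
      acc ++ [(get_full_part_number_from_coord matrix row c).1]
    else acc) nums
  if nums2.length == 2 then PySem.List.pyGetD nums2 0 0 * PySem.List.pyGetD nums2 1 0 else 0

-- ===== PRECONDITION & SPEC =====
def Spec_get_prod_of_adjacent_part_numbers_to_gear (matrix : List (List String)) (row : Int) (col : Int) (out : Int) : Prop := out = get_prod_of_adjacent_part_numbers_to_gear_alt matrix row col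
instance (matrix : List (List String)) (row : Int) (col : Int) (out : Int) : Decidable (Spec_get_prod_of_adjacent_part_numbers_to_gear matrix row col out) := by unfold Spec_get_prod_of_adjacent_part_numbers_to_gear; infer_instance

-- ===== CLAIM (what is proved, stated in full; the proofs are below) =====
def Claim_equal_get_prod_of_adjacent_part_numbers_to_gear : Prop := ∀ (matrix : List (List String)) (row : Int) (col : Int), Dom_get_prod_of_adjacent_part_numbers_to_gear matrix row col → Spec_get_prod_of_adjacent_part_numbers_to_gear matrix row col (get_prod_of_adjacent_part_numbers_to_gear matrix row col)

-- ===== LEMMAS AND PROOFS =====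

lemma is_part_num_elim (matrix : List (List String)) (r c : Int)
    (h : is_part_num matrix r c = true) :
    0 ≤ r ∧ 0 ≤ c ∧ ∃ rw, PySem.List.pyGet? matrix r = some rw ∧ pvNumAt rw c = true := by
  unfold is_part_num at h
  split at h
  · simp at h
  next hneg =>
    cases hg : PySem.List.pyGet? matrix r with
    | none => rw [hg] at h; simp at h
    | some rw =>
      rw [hg] at h
      simp at hneg
      exact ⟨by omega, by omega, rw, rfl, h⟩

lemma is_part_num_eq (matrix : List (List String)) (r c : Int) (rw : List String)
    (hr : 0 ≤ r) (hc : 0 ≤ c) (hg : PySem.List.pyGet? matrix r = some rw) :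
    is_part_num matrix r c = pvNumAt rw c := by
  unfold is_part_num
  rw [if_neg (by simp; omega), hg]

lemma get_full_eq (matrix : List (List String)) (r c : Int) (rw : List String)
    (hg : PySem.List.pyGet? matrix r = some rw) :
    get_full_part_number_from_coord matrix r c =
      ((PySem.Int.ofStr? (PySem.Str.join "" (PySem.List.slice rw
          (some (pvBeginAux rw c + 1)) (some (pvEndAux rw c))))).getD 0, pvEndAux rw c) := by
  unfold get_full_part_number_from_coord
  rw [hg]
  rfl

lemma pvEndAux_stop (rw : List String) (e : Int) :
    ¬((pvEndAux rw e) < (rw.length : Int) ∧ pvNumAt rw (pvEndAux rw e) = true) := by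
  fun_induction pvEndAux rw e with
  | case1 e h ih => exact ih
  | case2 e h => exact h

lemma pvEndAux_mid (rw : List String) (e : Int) :
    ∀ x, e ≤ x → x < pvEndAux rw e → x < (rw.length : Int) ∧ pvNumAt rw x = true := by
  fun_induction pvEndAux rw e with
  | case1 e h ih =>
    intro x hx1 hx2
    rcases eq_or_lt_of_le hx1 with rfl | hlt
    · exact h
    · exact ih x (by omega) hx2
  | case2 e h =>
    intro x hx1 hx2
    exact absurd hx2 (by omega)

lemma pvEndAux_step (rw : List String) (e : Int)
    (h : e < (rw.length : Int) ∧ pvNumAt rw e = true) :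
    pvEndAux rw e = pvEndAux rw (e + 1) := by
  conv_lhs => rw [pvEndAux]
  rw [dif_pos h]

lemma pvBeginAux_step (rw : List String) (b : Int)
    (h : 0 ≤ b ∧ pvNumAt rw b = true) :
    pvBeginAux rw b = pvBeginAux rw (b - 1) := by
  conv_lhs => rw [pvBeginAux]
  rw [dif_pos h]

-- two adjacent numeric cells belong to the same number
lemma run_eq (matrix : List (List String)) (r c : Int)
    (h1 : is_part_num matrix r c = true) (h2 : is_part_num matrix r (c + 1) = true) :
    get_full_part_number_from_coord matrix r c = get_full_part_number_from_coord matrix r (c + 1) := by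
  obtain ⟨hr, hc, rw, hg, hn⟩ := is_part_num_elim matrix r c h1
  have hn2 : pvNumAt rw (c + 1) = true := by
    rw [is_part_num_eq matrix r (c + 1) rw hr (by omega) hg] at h2; exact h2
  have hlen : c < (rw.length : Int) := pvNumAt_lt rw c hn hc
  have hb : pvBeginAux rw (c + 1) = pvBeginAux rw c := by
    have hs := pvBeginAux_step rw (c + 1) ⟨by omega, hn2⟩
    have hcc : c + 1 - 1 = c := by ring
    rw [hcc] at hs
    exact hs
  have he : pvEndAux rw c = pvEndAux rw (c + 1) := pvEndAux_step rw c ⟨hlen, hn⟩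
  rw [get_full_eq matrix r c rw hg, get_full_eq matrix r (c + 1) rw hg, hb, he]

-- the cell at a number's end is not numeric (or out of range)
lemma endAt_not (matrix : List (List String)) (r c : Int)
    (h : is_part_num matrix r c = true) :
    is_part_num matrix r (get_full_part_number_from_coord matrix r c).2 = false := by
  obtain ⟨hr, hc, rw, hg, hn⟩ := is_part_num_elim matrix r c h
  rw [get_full_eq matrix r c rw hg]
  show is_part_num matrix r (pvEndAux rw c) = false
  have hge : c ≤ pvEndAux rw c := pvEndAux_ge rw c
  rw [is_part_num_eq matrix r _ rw hr (by omega) hg]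
  cases hb : pvNumAt rw (pvEndAux rw c) with
  | false => rfl
  | true =>
    have := pvNumAt_lt rw _ hb (by omega)
    exact absurd ⟨this, hb⟩ (pvEndAux_stop rw c)

-- every cell strictly before the end of a number (and at/after a numeric cell) is numeric
lemma mid_true (matrix : List (List String)) (r c x : Int)
    (h : is_part_num matrix r c = true) (hx1 : c ≤ x)
    (hx2 : x < (get_full_part_number_from_coord matrix r c).2) :
    is_part_num matrix r x = true := by
  obtain ⟨hr, hc, rw, hg, hn⟩ := is_part_num_elim matrix r c h
  rw [get_full_eq matrix r c rw hg] at hx2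
  have hx2' : x < pvEndAux rw c := hx2
  obtain ⟨hl, hnum⟩ := pvEndAux_mid rw c x hx1 hx2'
  rw [is_part_num_eq matrix r x rw hr (by omega) hg]
  exact hnum

lemma loopA_done (matrix : List (List String)) (row col c : Int) (acc : List Int)
    (h : ¬ c < col + 2) : pvLoopA matrix row col c acc = acc := by
  rw [pvLoopA, dif_neg h]

lemma loopA_hit (matrix : List (List String)) (row col c : Int) (acc : List Int)
    (hc : c < col + 2) (hp : is_part_num matrix row c = true) :
    pvLoopA matrix row col c acc =
      pvLoopA matrix row col (get_full_part_number_from_coord matrix row c).2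
        (acc ++ [(get_full_part_number_from_coord matrix row c).1]) := by
  conv_lhs => rw [pvLoopA]
  rw [dif_pos hc, dif_pos hp]

lemma loopA_miss (matrix : List (List String)) (row col c : Int) (acc : List Int)
    (hc : c < col + 2) (hp : is_part_num matrix row c = false) :
    pvLoopA matrix row col c acc = pvLoopA matrix row col (c + 1) acc := by
  conv_lhs => rw [pvLoopA]
  rw [dif_pos hc, dif_neg (by simp [hp])]

-- the heart of the equivalence: A's jump loop over one row equals B's window scan of that row
theorem row_eq (matrix : List (List String)) (r col : Int) (acc : List Int) :
    pvLoopA matrix r col (col - 1) acc =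
      [col - 1, col, col + 1].foldl (fun acc c =>
        if is_part_num matrix r c && (c == col - 1 || !is_part_num matrix r (c - 1)) then
          acc ++ [(get_full_part_number_from_coord matrix r c).1]
        else acc) acc := by
  have e5 : col - 1 + 1 = col := by ring
  have e6 : col + 1 - 1 = col := by ring
  have b1 : (col == col - 1) = false := by simp; omega
  have b2 : (col + 1 == col - 1) = false := by simp; omega
  simp only [List.foldl, beq_self_eq_true, Bool.true_or, Bool.and_true, b1, b2, Bool.false_or, e6]
  cases h1 : is_part_num matrix r (col - 1) with
  | true =>
    rw [loopA_hit matrix r col (col - 1) acc (by omega) h1]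
    cases h2 : is_part_num matrix r col with
    | true =>
      have hrun : get_full_part_number_from_coord matrix r (col - 1) =
          get_full_part_number_from_coord matrix r col := by
        have hx := run_eq matrix r (col - 1) h1 (by rw [e5]; exact h2)
        rwa [e5] at hx
      cases h3 : is_part_num matrix r (col + 1) with
      | true =>
        have hrun2 : get_full_part_number_from_coord matrix r col =
            get_full_part_number_from_coord matrix r (col + 1) := run_eq matrix r col h2 h3
        have hge : col + 2 ≤ (get_full_part_number_from_coord matrix r (col - 1)).2 := by
          rw [hrun, hrun2]
          have := get_full_snd_gt matrix r (col + 1) h3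
          omega
        rw [loopA_done matrix r col _ _ (by omega)]
        simp
      | false =>
        have hgt : col < (get_full_part_number_from_coord matrix r (col - 1)).2 := by
          rw [hrun]; exact get_full_snd_gt matrix r col h2
        by_cases hE : (get_full_part_number_from_coord matrix r (col - 1)).2 < col + 2
        · have hEeq : (get_full_part_number_from_coord matrix r (col - 1)).2 = col + 1 := by omega
          rw [hEeq, loopA_miss matrix r col (col + 1) _ (by omega) h3,
            loopA_done matrix r col _ _ (by omega)]
          simp
        · rw [loopA_done matrix r col _ _ hE]
          simp
    | false =>
      have hgt : col - 1 < (get_full_part_number_from_coord matrix r (col - 1)).2 :=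
        get_full_snd_gt matrix r (col - 1) h1
      have hEeq : (get_full_part_number_from_coord matrix r (col - 1)).2 = col := by
        by_contra hne
        have hmid : is_part_num matrix r col = true :=
          mid_true matrix r (col - 1) col h1 (by omega) (by omega)
        simp [h2] at hmid
      rw [hEeq, loopA_miss matrix r col col _ (by omega) h2]
      cases h3 : is_part_num matrix r (col + 1) with
      | true =>
        rw [loopA_hit matrix r col (col + 1) _ (by omega) h3]
        have := get_full_snd_gt matrix r (col + 1) h3
        rw [loopA_done matrix r col _ _ (by omega)]
        simp
      | false =>
        rw [loopA_miss matrix r col (col + 1) _ (by omega) h3,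
          loopA_done matrix r col _ _ (by omega)]
        simp
  | false =>
    rw [loopA_miss matrix r col (col - 1) acc (by omega) h1, e5]
    cases h2 : is_part_num matrix r col with
    | true =>
      rw [loopA_hit matrix r col col acc (by omega) h2]
      have hnotE := endAt_not matrix r col h2
      have hgt := get_full_snd_gt matrix r col h2
      by_cases hE : (get_full_part_number_from_coord matrix r col).2 < col + 2
      · have hEeq : (get_full_part_number_from_coord matrix r col).2 = col + 1 := by omega
        rw [hEeq] at hnotE
        rw [hEeq, loopA_miss matrix r col (col + 1) _ (by omega) hnotE,
          loopA_done matrix r col _ _ (by omega)]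
        simp
      · rw [loopA_done matrix r col _ _ hE]
        simp
    | false =>
      rw [loopA_miss matrix r col col acc (by omega) h2]
      cases h3 : is_part_num matrix r (col + 1) with
      | true =>
        rw [loopA_hit matrix r col (col + 1) acc (by omega) h3]
        have := get_full_snd_gt matrix r (col + 1) h3
        rw [loopA_done matrix r col _ _ (by omega)]
        simp
      | false =>
        rw [loopA_miss matrix r col (col + 1) acc (by omega) h3,
          loopA_done matrix r col _ _ (by omega)]
        simp

-- ===== VERDICT (by name: the statement is the Claim_ definition above) =====
theorem get_prod_of_adjacent_part_numbers_to_gear_spec : Claim_equal_get_prod_of_adjacent_part_numbers_to_gear := by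
  intro matrix row col _
  unfold Spec_get_prod_of_adjacent_part_numbers_to_gear
  unfold get_prod_of_adjacent_part_numbers_to_gear get_prod_of_adjacent_part_numbers_to_gear_alt
  simp only [row_eq]
  simp only [List.foldl_cons, List.foldl_nil]
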